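-- pv_equiv track=rewrite | github.com/PrograMario12/Command-Patter-Design-With-Differents-functions-In-Python | main_files/sort_names_vowels.py | sort_names_by_vowels
-- ===== SOURCE A (Python) =====
-- def sort_names_by_vowels(names):
--     def count_vowels(name):
--         vowel_count = 0
--         vowels = ['a', 'e', 'i', 'o', 'u']
--         for letter in name.lower():
--             if letter in vowels:
--                 vowel_count += 1
--         return vowel_count
--
--     sorted_names = sorted(names, key=lambda x: (-count_vowels(x), x.lower()))
--     return sorted_names
-- ===== SOURCE B (Python) =====
-- def sort_names_by_vowels(names):
--     buckets = {}
--     for name in names: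
--         c = sum(1 for ch in name.lower() if ch in 'aeiou')
--         buckets.setdefault(c, []).append(name)
--     result = []
--     for c in sorted(buckets, reverse=True):
--         result.extend(sorted(buckets[c], key=str.lower))
--     return result
-- ===== Notes on version B (the rewrite author's own statement) =====
-- stated objective: alternative
-- what changed: B replaces A's single composite-key sort (-vowel_count, name.lower()) by building a vowel-count -> bucket index in one pass over the input, sorting the distinct counts descending, sorting each bucket stably by name.lower() alone, and concatenating the buckets.
import Mathlib
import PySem

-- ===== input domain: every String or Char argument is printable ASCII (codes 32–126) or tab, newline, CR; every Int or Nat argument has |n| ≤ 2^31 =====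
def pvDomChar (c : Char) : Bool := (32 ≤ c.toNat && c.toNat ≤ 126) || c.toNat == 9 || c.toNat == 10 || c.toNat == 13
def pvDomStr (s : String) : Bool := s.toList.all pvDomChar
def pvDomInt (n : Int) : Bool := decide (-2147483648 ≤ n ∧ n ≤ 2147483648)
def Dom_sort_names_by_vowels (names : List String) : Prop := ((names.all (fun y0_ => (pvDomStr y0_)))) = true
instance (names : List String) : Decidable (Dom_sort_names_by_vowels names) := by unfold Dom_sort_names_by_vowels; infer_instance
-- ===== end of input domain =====

-- B replaces A's single composite-key sort by a count→bucket index built in one pass, the distinct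
-- counts sorted descending, each bucket sorted stably by lower-cased name, buckets concatenated
-- (objective: alternative decomposition).

-- ===== PORT A =====
-- A's inner helper count_vowels: loop over name.lower(), membership in the vowel list.
def pvCountVowelsA (name : String) : Int :=
  (PySem.Str.lower name).toList.foldl
    (fun vowel_count letter =>
      if (['a', 'e', 'i', 'o', 'u'].contains letter) then vowel_count + 1 else vowel_count) 0

def sort_names_by_vowels (names : List String) : List String :=
  PySem.List.sorted2 names (fun x => -(pvCountVowelsA x)) (fun x => PySem.Str.lower x)

-- ===== PORT B =====
-- B's count: sum(1 for ch in name.lower() if ch in 'aeiou')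
def pvCountVowelsB (name : String) : Int :=
  (((PySem.Str.lower name).toList.filter (fun ch => "aeiou".toList.contains ch)).length : Int)

def sort_names_by_vowels_alt (names : List String) : List String :=
  let buckets : PySem.Dict Int (List String) :=
    names.foldl (fun d name => d.modify (pvCountVowelsB name) [] (fun l => l ++ [name])) PySem.Dict.empty
  (PySem.List.sorted buckets.keys (fun c => c) true).foldl
    (fun result c =>
      result ++ PySem.List.sorted (buckets.getD c []) (fun s => PySem.Str.lower s)) []

-- ===== PRECONDITION & SPEC =====
def Spec_sort_names_by_vowels (names : List String) (out : List String) : Prop := out = sort_names_by_vowels_alt names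
instance (names : List String) (out : List String) : Decidable (Spec_sort_names_by_vowels names out) := by unfold Spec_sort_names_by_vowels; infer_instance

-- ===== CLAIM (what is proved, stated in full; the proofs are below) =====
def Claim_equal_sort_names_by_vowels : Prop := ∀ (names : List String), Dom_sort_names_by_vowels names → Spec_sort_names_by_vowels names (sort_names_by_vowels names)

-- ===== LEMMAS AND PROOFS =====

-- counting a fold equals the length of the filtered list
theorem pvCount_foldl (p : Char → Bool) (l : List Char) (init : Int) :
    l.foldl (fun acc c => if p c then acc + 1 else acc) init = init + ((l.filter p).length : Int) := by
  induction l generalizing init with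
  | nil => simp
  | cons c t ih =>
    by_cases h : p c
    · simp [List.foldl, h, ih]; ring
    · simp [List.foldl, h, ih]

-- the two vowel counters agree
theorem pvCount_eq : pvCountVowelsA = pvCountVowelsB := by
  funext name
  unfold pvCountVowelsA pvCountVowelsB
  have hv : ("aeiou".toList = ['a', 'e', 'i', 'o', 'u']) := by decide
  rw [hv, pvCount_foldl]
  simp only [Int.zero_add]

-- the three comparators appearing in the two ports
def pvTup (a b : String) : Bool :=
  decide ((-(pvCountVowelsB a) : Int) < -(pvCountVowelsB b)) ||
    (!decide ((-(pvCountVowelsB b) : Int) < -(pvCountVowelsB a)) &&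
      decide (PySem.Str.lower a < PySem.Str.lower b))
def pvLow (a b : String) : Bool := decide (PySem.Str.lower a < PySem.Str.lower b)
def pvDesc (a b : Int) : Bool := decide (b < a)

theorem pvTup_of_lt {x y : String} (h : pvCountVowelsB y < pvCountVowelsB x) : pvTup x y = true := by
  simp [pvTup]; omega

theorem pvTup_of_gt {x y : String} (h : pvCountVowelsB x < pvCountVowelsB y) : pvTup x y = false := by
  have h1 : decide ((-(pvCountVowelsB x) : Int) < -(pvCountVowelsB y)) = false := by simp; omega
  have h2 : decide ((-(pvCountVowelsB y) : Int) < -(pvCountVowelsB x)) = true := by simp; omega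
  unfold pvTup
  rw [h1, h2]
  rfl

theorem pvTup_of_eq {x y : String} (h : pvCountVowelsB x = pvCountVowelsB y) : pvTup x y = pvLow x y := by
  simp [pvTup, pvLow, h]

-- insertBy facts
theorem pvInsertBy_all_true {α : Type} (bef : α → α → Bool) (x : α) (ys : List α)
    (h : ∀ y ∈ ys, bef x y = true) : PySem.List.insertBy bef x ys = x :: ys := by
  cases ys with
  | nil => rfl
  | cons y t => simp [PySem.List.insertBy, h y (by simp)]

theorem pvInsertBy_append_skip {α : Type} (bef : α → α → Bool) (x : α) (l1 l2 : List α)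
    (h : ∀ y ∈ l1, bef x y = false) :
    PySem.List.insertBy bef x (l1 ++ l2) = l1 ++ PySem.List.insertBy bef x l2 := by
  induction l1 with
  | nil => simp
  | cons y t ih =>
    simp only [List.cons_append, PySem.List.insertBy, h y (by simp)]
    simp [ih (fun z hz => h z (by simp [hz]))]

theorem pvInsertBy_append_within {α : Type} (bef bef' : α → α → Bool) (x : α) (l1 l2 : List α)
    (h2 : ∀ y ∈ l2, bef x y = true) (h1 : ∀ y ∈ l1, bef x y = bef' x y) :
    PySem.List.insertBy bef x (l1 ++ l2) = PySem.List.insertBy bef' x l1 ++ l2 := by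
  induction l1 with
  | nil =>
    cases l2 with
    | nil => rfl
    | cons z t => simp [PySem.List.insertBy, h2 z (by simp)]
  | cons y t ih =>
    simp only [List.cons_append, PySem.List.insertBy, h1 y (by simp)]
    by_cases hb : bef' x y = true
    · simp [hb]
    · simp only [Bool.not_eq_true] at hb
      simp [hb, ih (fun z hz => h1 z (by simp [hz]))]

theorem pvFlatMap_congr_mem {α β : Type} (l : List α) (f g : α → List β)
    (h : ∀ c ∈ l, f c = g c) : l.flatMap f = l.flatMap g := by
  induction l with
  | nil => rfl
  | cons c t ih => simp [List.flatMap_cons, h c (by simp), ih (fun z hz => h z (by simp [hz]))]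

-- inserting a name whose count already has a block: it is inserted inside that block by pvLow
theorem pvInsert_block_mem (x : String) (cs : List Int) (g : Int → List String)
    (hs : cs.Pairwise (· > ·)) (hg : ∀ c ∈ cs, ∀ y ∈ g c, pvCountVowelsB y = c)
    (hx : pvCountVowelsB x ∈ cs) :
    PySem.List.insertBy pvTup x (cs.flatMap g) =
      cs.flatMap (fun c => if c = pvCountVowelsB x then PySem.List.insertBy pvLow x (g c) else g c) := by
  induction cs with
  | nil => simp at hx
  | cons c t ih =>
    rcases List.pairwise_cons.mp hs with ⟨hct, ht⟩
    by_cases hc : c = pvCountVowelsB x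
    · have h2 : ∀ y ∈ t.flatMap g, pvTup x y = true := by
        intro y hy
        rcases List.mem_flatMap.mp hy with ⟨c', hc', hyc'⟩
        have h3 := hg c' (by simp [hc']) y hyc'
        have h4 := hct c' hc'
        exact pvTup_of_lt (by omega)
      have h1 : ∀ y ∈ g c, pvTup x y = pvLow x y := by
        intro y hy
        have h3 := hg c (by simp) y hy
        exact pvTup_of_eq (by omega)
      rw [List.flatMap_cons, pvInsertBy_append_within _ _ _ _ _ h2 h1, List.flatMap_cons,
        if_pos hc]
      congr 1
      exact (pvFlatMap_congr_mem t _ _ (fun c' hc' => by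
        rw [if_neg (by have := hct c' hc'; omega)])).symm
    · have hxt : pvCountVowelsB x ∈ t := by
        rcases List.mem_cons.mp hx with h | h
        · exact absurd h.symm hc
        · exact h
      have hcgt : pvCountVowelsB x < c := hct _ hxt
      have hskip : ∀ y ∈ g c, pvTup x y = false := by
        intro y hy
        have h3 := hg c (by simp) y hy
        exact pvTup_of_gt (by omega)
      rw [List.flatMap_cons, pvInsertBy_append_skip _ _ _ _ hskip, List.flatMap_cons,
        if_neg hc, ih ht (fun c' hc' => hg c' (by simp [hc'])) hxt]

-- inserting a name with a fresh count: a new one-element block appears at the count's position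
theorem pvInsert_block_new (x : String) (cs : List Int) (g : Int → List String)
    (hs : cs.Pairwise (· > ·)) (hg : ∀ c ∈ cs, ∀ y ∈ g c, pvCountVowelsB y = c)
    (hx : pvCountVowelsB x ∉ cs) :
    PySem.List.insertBy pvTup x (cs.flatMap g) =
      (PySem.List.insertBy pvDesc (pvCountVowelsB x) cs).flatMap
        (fun c => if c = pvCountVowelsB x then [x] else g c) := by
  induction cs with
  | nil => simp [PySem.List.insertBy]
  | cons c t ih =>
    rcases List.pairwise_cons.mp hs with ⟨hct, ht⟩
    have hcne : c ≠ pvCountVowelsB x := fun h => hx (by simp [h])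
    by_cases hlt : c < pvCountVowelsB x
    · have hall : ∀ y ∈ (c :: t).flatMap g, pvTup x y = true := by
        intro y hy
        rcases List.mem_flatMap.mp hy with ⟨c', hc', hyc'⟩
        have : pvCountVowelsB y = c' := hg c' hc' y hyc'
        rcases List.mem_cons.mp hc' with h | h
        · exact pvTup_of_lt (by omega)
        · exact pvTup_of_lt (by have := hct c' h; omega)
      rw [pvInsertBy_all_true _ _ _ hall]
      have hins : PySem.List.insertBy pvDesc (pvCountVowelsB x) (c :: t) =
          pvCountVowelsB x :: c :: t := by
        simp [PySem.List.insertBy, pvDesc, hlt]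
      rw [hins]
      conv_rhs => rw [List.flatMap_cons]
      rw [if_pos rfl, List.singleton_append]
      congr 1
      exact (pvFlatMap_congr_mem _ _ _ (fun c' hc' => by
        rcases List.mem_cons.mp hc' with h | h
        · rw [h, if_neg hcne]
        · rw [if_neg (by intro he; exact hx (by rw [← he]; simp [h]))])).symm
    · have hgt : pvCountVowelsB x < c := lt_of_le_of_ne (not_lt.mp hlt) (Ne.symm hcne)
      have hskip : ∀ y ∈ g c, pvTup x y = false := by
        intro y hy
        have h3 := hg c (by simp) y hy
        exact pvTup_of_gt (by omega)
      have hxt : pvCountVowelsB x ∉ t := fun h => hx (by simp [h])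
      rw [List.flatMap_cons, pvInsertBy_append_skip _ _ _ _ hskip]
      have hins : PySem.List.insertBy pvDesc (pvCountVowelsB x) (c :: t) =
          c :: PySem.List.insertBy pvDesc (pvCountVowelsB x) t := by
        simp [PySem.List.insertBy, pvDesc, asymm hgt]
      rw [hins, List.flatMap_cons, if_neg hcne,
        ih ht (fun c' hc' => hg c' (by simp [hc'])) hxt]

-- canonical middle form shared by both ports
def pvCounts (names : List String) : List Int :=
  PySem.List.sorted (PySem.Set.ofList (names.map pvCountVowelsB)) (fun c => c) true

def pvBucket (names : List String) (c : Int) : List String :=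
  PySem.List.sorted (names.filter (fun n => pvCountVowelsB n == c)) (fun s => PySem.Str.lower s)

def pvCanon (names : List String) : List String :=
  (pvCounts names).flatMap (pvBucket names)

-- appending one element to a sorted list inserts it
theorem pvSorted_append {α κ : Type} [LinearOrder κ] (l : List α) (x : α) (key : α → κ) :
    PySem.List.sorted (l ++ [x]) key =
      PySem.List.insertBy (fun a b => decide (key a < key b)) x (PySem.List.sorted l key) := by
  rw [PySem.List.sorted_eq_foldl_insertBy, PySem.List.sorted_eq_foldl_insertBy, List.foldl_append]
  rfl

theorem pvSorted_rev_append {α κ : Type} [LinearOrder κ] (l : List α) (x : α) (key : α → κ) :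
    PySem.List.sorted (l ++ [x]) key true =
      PySem.List.insertBy (fun a b => decide (key b < key a)) x (PySem.List.sorted l key true) := by
  rw [PySem.List.sorted_rev_eq_foldl_insertBy, PySem.List.sorted_rev_eq_foldl_insertBy,
    List.foldl_append]
  rfl

theorem pvSorted2_append (l : List String) (x : String) :
    PySem.List.sorted2 (l ++ [x]) (fun s => -(pvCountVowelsB s)) (fun s => PySem.Str.lower s) =
      PySem.List.insertBy pvTup x
        (PySem.List.sorted2 l (fun s => -(pvCountVowelsB s)) (fun s => PySem.Str.lower s)) := by
  simp only [PySem.List.sorted2, List.foldl_append, List.foldl_cons, List.foldl_nil]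
  rfl

theorem pvCounts_pairwise (names : List String) : (pvCounts names).Pairwise (· > ·) := by
  have h1 := PySem.List.sorted_pairwise_rev (PySem.Set.ofList (names.map pvCountVowelsB)) (fun c => c)
  have h2 : (pvCounts names).Nodup :=
    ((PySem.List.sorted_perm (PySem.Set.ofList (names.map pvCountVowelsB)) (fun c => c) true).nodup_iff).mpr
      (PySem.Set.nodup_ofList _)
  exact (h1.and h2).imp (fun h => lt_of_le_of_ne h.1 (Ne.symm h.2))

theorem pvBucket_counts (names : List String) (c : Int) :
    ∀ y ∈ pvBucket names c, pvCountVowelsB y = c := by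
  intro y hy
  have := (PySem.List.mem_sorted _ _ _ y).mp hy
  have := List.mem_filter.mp this
  simpa using this.2

theorem pvMem_counts (names : List String) (c : Int) :
    c ∈ pvCounts names ↔ c ∈ names.map pvCountVowelsB := by
  rw [pvCounts, PySem.List.mem_sorted, PySem.Set.mem_ofList]

-- main lemma: A's composite-key stable sort equals the canonical grouped form
theorem pvA_eq_canon (names : List String) :
    PySem.List.sorted2 names (fun s => -(pvCountVowelsB s)) (fun s => PySem.Str.lower s) =
      pvCanon names := by
  induction names using List.reverseRecOn with
  | nil => rfl
  | append_singleton l x ih =>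
    rw [pvSorted2_append, ih]
    by_cases hm : pvCountVowelsB x ∈ l.map pvCountVowelsB
    · -- existing block
      have hcounts : pvCounts (l ++ [x]) = pvCounts l := by
        unfold pvCounts
        rw [List.map_append, List.map_singleton, PySem.Set.ofList_eq_foldl, List.foldl_append]
        rw [← PySem.Set.ofList_eq_foldl]
        simp only [List.foldl_cons, List.foldl_nil]
        have hm' : ∃ a ∈ l, pvCountVowelsB a = pvCountVowelsB x := List.mem_map.mp hm
        rw [show PySem.Set.add (PySem.Set.ofList (l.map pvCountVowelsB)) (pvCountVowelsB x) =
            PySem.Set.ofList (l.map pvCountVowelsB) by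
          simp [PySem.Set.add, PySem.Set.contains, hm']]
      rw [show pvCanon l = (pvCounts l).flatMap (pvBucket l) from rfl,
        show pvCanon (l ++ [x]) = (pvCounts (l ++ [x])).flatMap (pvBucket (l ++ [x])) from rfl,
        hcounts,
        pvInsert_block_mem x (pvCounts l) (pvBucket l) (pvCounts_pairwise l)
          (fun c _ => pvBucket_counts l c) ((pvMem_counts l _).mpr hm)]
      apply pvFlatMap_congr_mem
      intro c hc
      by_cases hcx : c = pvCountVowelsB x
      · rw [if_pos hcx]
        unfold pvBucket
        rw [List.filter_append]
        have : List.filter (fun n => pvCountVowelsB n == c) [x] = [x] := by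
          simp [hcx]
        rw [this, pvSorted_append]
        rfl
      · rw [if_neg hcx]
        unfold pvBucket
        rw [List.filter_append]
        have : List.filter (fun n => pvCountVowelsB n == c) [x] = [] := by
          simp; omega
        rw [this, List.append_nil]
    · -- fresh count
      have hcounts : pvCounts (l ++ [x]) =
          PySem.List.insertBy pvDesc (pvCountVowelsB x) (pvCounts l) := by
        unfold pvCounts
        rw [List.map_append, List.map_singleton, PySem.Set.ofList_eq_foldl, List.foldl_append]
        rw [← PySem.Set.ofList_eq_foldl]
        simp only [List.foldl_cons, List.foldl_nil]
        have hm' : ∀ a ∈ l, ¬ pvCountVowelsB a = pvCountVowelsB x :=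
          fun a ha he => hm (he ▸ List.mem_map_of_mem ha)
        rw [show PySem.Set.add (PySem.Set.ofList (l.map pvCountVowelsB)) (pvCountVowelsB x) =
            PySem.Set.ofList (l.map pvCountVowelsB) ++ [pvCountVowelsB x] by
          simp [PySem.Set.add, PySem.Set.contains]
          exact hm']
        rw [pvSorted_rev_append]
        rfl
      rw [show pvCanon l = (pvCounts l).flatMap (pvBucket l) from rfl,
        show pvCanon (l ++ [x]) = (pvCounts (l ++ [x])).flatMap (pvBucket (l ++ [x])) from rfl,
        hcounts,
        pvInsert_block_new x (pvCounts l) (pvBucket l) (pvCounts_pairwise l)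
          (fun c _ => pvBucket_counts l c) (fun h => hm ((pvMem_counts l _).mp h))]
      apply pvFlatMap_congr_mem
      intro c hc
      rcases (PySem.List.mem_insertBy _ _ _ _).mp hc with h | h
      · rw [if_pos h]
        unfold pvBucket
        rw [List.filter_append]
        have h1 : List.filter (fun n => pvCountVowelsB n == c) l = [] := by
          rw [List.filter_eq_nil_iff]
          intro a ha
          simp
          intro he
          exact hm (by rw [← h, ← he]; exact List.mem_map_of_mem ha)
        have h2 : List.filter (fun n => pvCountVowelsB n == c) [x] = [x] := by
          simp [h]
        rw [h1, h2]
        rfl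
      · have hne : c ≠ pvCountVowelsB x := by
          intro he
          exact hm ((pvMem_counts l _).mp (he ▸ h))
        rw [if_neg hne]
        unfold pvBucket
        rw [List.filter_append]
        have : List.filter (fun n => pvCountVowelsB n == c) [x] = [] := by
          simp; omega
        rw [this, List.append_nil]

-- B's port reduces to the canonical form
theorem pvB_eq_canon (names : List String) : sort_names_by_vowels_alt names = pvCanon names := by
  unfold sort_names_by_vowels_alt
  simp only []
  have hfold : names.foldl
      (fun d name => d.modify (pvCountVowelsB name) [] (fun l => l ++ [name])) PySem.Dict.empty
      = (names.map (fun n => (pvCountVowelsB n, n))).foldl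
          (fun d p => d.modify p.1 [] (fun l => l ++ [p.2])) PySem.Dict.empty := by
    rw [List.foldl_map]
  have hkeys : (names.foldl
      (fun d name => d.modify (pvCountVowelsB name) [] (fun l => l ++ [name]))
      (PySem.Dict.empty : PySem.Dict Int (List String))).keys
      = PySem.Set.ofList (names.map pvCountVowelsB) := by
    rw [PySem.Dict.keys_foldl_modify_key names pvCountVowelsB [] (fun _ name => fun l => l ++ [name])
      PySem.Dict.empty]
    rw [show (PySem.Dict.empty : PySem.Dict Int (List String)).keys = [] from rfl,
      PySem.Set.update_nil_left]
  have hgetD : ∀ c, (names.foldl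
      (fun d name => d.modify (pvCountVowelsB name) [] (fun l => l ++ [name]))
      (PySem.Dict.empty : PySem.Dict Int (List String))).getD c []
      = names.filter (fun n => pvCountVowelsB n == c) := by
    intro c
    rw [hfold, PySem.Dict.getD_foldl_modify_append]
    simp [List.filter_map, Function.comp_def]
  rw [PySem.List.foldl_append_eq_flatMap, List.nil_append, hkeys]
  apply pvFlatMap_congr_mem
  intro c hc
  rw [hgetD c]
  rfl

-- ===== VERDICT (by name: the statement is the Claim_ definition above) =====
theorem sort_names_by_vowels_spec : Claim_equal_sort_names_by_vowels := by
  intro names _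
  show sort_names_by_vowels names = sort_names_by_vowels_alt names
  rw [pvB_eq_canon]
  unfold sort_names_by_vowels
  rw [pvCount_eq]
  exact pvA_eq_canon names
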